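-- pv_equiv track=rewrite | github.com/SQNing/Design_Mott_Materials | translation-invariant-spin-model-simplifier/scripts/classical/cpn_generalized_lt_solver.py | _default_mesh_shape
-- ===== SOURCE A (Python) =====
-- def _active_axes(model):
--     active = []
--     for axis in range(3):
--         if any(int(bond["R"][axis]) != 0 for bond in model.get("bond_tensors", [])):
--             active.append(axis)
--     return active or [0]
--
-- def _default_mesh_shape(model, mesh_shape):
--     if mesh_shape is not None:
--         resolved = [max(1, int(value)) for value in mesh_shape]
--         if len(resolved) != 3:
--             raise ValueError("mesh_shape must have length 3")
--         return tuple(resolved)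
--
--     active = set(_active_axes(model))
--     resolved = []
--     for axis in range(3):
--         resolved.append(17 if axis in active else 1)
--     return tuple(resolved)
-- ===== SOURCE B (Python) =====
-- _SHAPES = {
--     0b000: (1, 1, 1),   # unreachable: mask 0 is replaced by 1 via `mask or 1`
--     0b001: (17, 1, 1),
--     0b010: (1, 17, 1),
--     0b011: (17, 17, 1),
--     0b100: (1, 1, 17),
--     0b101: (17, 1, 17),
--     0b110: (1, 17, 17),
--     0b111: (17, 17, 17),
-- }
--
-- def _bond_mask(bond):
--     r = bond["R"]
--     return (int(r[0]) != 0) | ((int(r[1]) != 0) << 1) | ((int(r[2]) != 0) << 2)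
--
-- def _default_mesh_shape(model, mesh_shape):
--     if mesh_shape is not None:
--         resolved = [max(1, int(value)) for value in mesh_shape]
--         if len(resolved) != 3:
--             raise ValueError("mesh_shape must have length 3")
--         return tuple(resolved)
--     mask = 0
--     for bond in model.get("bond_tensors", []):
--         mask |= _bond_mask(bond)
--     return _SHAPES[mask or 1]
-- ===== Notes on version B (the rewrite author's own statement) =====
-- stated objective: alternative
-- what changed: Replaces the three per-axis any() scans plus set membership with a single pass OR-ing each bond's 3-bit activity mask into one integer and a precomputed 8-entry lookup table mapping the mask (defaulted to 1 when zero, mirroring `active or [0]`) to the shape tuple.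
import Mathlib
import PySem

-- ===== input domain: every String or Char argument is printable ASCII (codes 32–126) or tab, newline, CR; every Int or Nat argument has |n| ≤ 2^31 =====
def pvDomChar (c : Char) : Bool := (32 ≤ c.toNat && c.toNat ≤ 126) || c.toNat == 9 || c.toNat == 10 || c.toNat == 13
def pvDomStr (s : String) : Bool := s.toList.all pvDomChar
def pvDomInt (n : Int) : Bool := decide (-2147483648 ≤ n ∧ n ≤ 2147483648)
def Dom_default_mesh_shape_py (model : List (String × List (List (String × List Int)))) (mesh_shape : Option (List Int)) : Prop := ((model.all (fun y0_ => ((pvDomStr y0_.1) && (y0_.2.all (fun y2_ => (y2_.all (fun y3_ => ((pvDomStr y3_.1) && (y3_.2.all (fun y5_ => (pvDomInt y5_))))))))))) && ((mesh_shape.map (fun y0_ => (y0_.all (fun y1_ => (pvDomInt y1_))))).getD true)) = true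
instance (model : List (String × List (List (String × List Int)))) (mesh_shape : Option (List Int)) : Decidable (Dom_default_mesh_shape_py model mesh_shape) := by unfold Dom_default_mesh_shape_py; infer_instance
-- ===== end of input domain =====

-- B replaces A's three per-axis any() scans and set membership with a one-pass OR of 3-bit
-- bond masks and an 8-entry lookup table (an alternative formulation, same results).


-- ===== PORT A =====
-- int(bond["R"][axis]) != 0; the KeyError/IndexError cases (missing "R", short R) default
-- here and are excluded by Pre_
def pvNZa (bond : List (String × List Int)) (axis : Int) : Bool :=
  decide ((PySem.List.pyGet? (((PySem.Dict.mk bond).get? "R").getD []) axis).getD 0 ≠ 0)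

-- _active_axes(model)
def pvActiveAxes (model : List (String × List (List (String × List Int)))) : List Int :=
  let bonds := (PySem.Dict.mk model).getD "bond_tensors" []
  let active := (PySem.List.pyRange 0 3 1).foldl
    (fun acc axis => if bonds.any (fun bond => pvNZa bond axis) then acc ++ [axis] else acc) []
  if active = [] then [0] else active

def default_mesh_shape_py (model : List (String × List (List (String × List Int)))) (mesh_shape : Option (List Int)) : List Int :=
  match mesh_shape with
  | some ms =>
    let resolved := ms.map (fun v => max 1 v)
    if resolved.length ≠ 3 then [] else resolved  -- [] stands for 'raise ValueError'; excluded by Pre_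
  | none =>
    let active : PySem.Set Int := PySem.Set.ofList (pvActiveAxes model)
    (PySem.List.pyRange 0 3 1).foldl
      (fun acc axis => acc ++ [if PySem.Set.contains active axis then (17 : Int) else 1]) []

-- ===== PORT B =====
-- the _SHAPES table of Source B (dict keyed by the 3-bit mask)
def pvShapes : List (Nat × List Int) :=
  [(0, [1, 1, 1]), (1, [17, 1, 1]), (2, [1, 17, 1]), (3, [17, 17, 1]),
   (4, [1, 1, 17]), (5, [17, 1, 17]), (6, [1, 17, 17]), (7, [17, 17, 17])]

-- _bond_mask(bond): (int(r[0]) != 0) | ((int(r[1]) != 0) << 1) | ((int(r[2]) != 0) << 2)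
-- (the mask is a nonnegative Python int with bits 0..2, so Nat with ||| / <<< is exact;
--  B tests the same atomic condition int(r[axis]) != 0, so it reuses pvNZa)
def pvBondMask (bond : List (String × List Int)) : Nat :=
  (if pvNZa bond 0 then 1 else 0) |||
  ((if pvNZa bond 1 then 1 else 0) <<< 1) |||
  ((if pvNZa bond 2 then 1 else 0) <<< 2)

def default_mesh_shape_py_alt (model : List (String × List (List (String × List Int)))) (mesh_shape : Option (List Int)) : List Int :=
  match mesh_shape with
  | some ms =>
    let resolved := ms.map (fun v => max 1 v)
    if resolved.length ≠ 3 then [] else resolved  -- [] stands for 'raise ValueError'; excluded by Pre_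
  | none =>
    let mask := ((PySem.Dict.mk model).getD "bond_tensors" []).foldl
      (fun m bond => m ||| pvBondMask bond) 0
    (PySem.Dict.mk pvShapes).getD (if mask = 0 then 1 else mask) []  -- _SHAPES[mask or 1]

-- ===== PRECONDITION & SPEC =====
-- Pre_ excludes: (a) an explicit mesh_shape whose length is not 3 (A raises ValueError), and
-- (b) mesh_shape = None with a bond lacking an "R" list of length ≥ 3 (A's per-axis any() may
-- raise KeyError/IndexError, or short-circuit past the malformed bond where B's single pass
-- would raise — A's return there is an artefact of scan order).
def Pre_default_mesh_shape_py (model : List (String × List (List (String × List Int)))) (mesh_shape : Option (List Int)) : Prop :=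
  (mesh_shape.all (fun ms => ms.length == 3) = true) ∧
  (mesh_shape = none → ∀ bond ∈ (PySem.Dict.mk model).getD "bond_tensors" [],
      ((PySem.Dict.mk bond).get? "R").isSome = true ∧
      3 ≤ (((PySem.Dict.mk bond).get? "R").getD []).length)
instance (model : List (String × List (List (String × List Int)))) (mesh_shape : Option (List Int)) : Decidable (Pre_default_mesh_shape_py model mesh_shape) := by unfold Pre_default_mesh_shape_py; infer_instance

def pvWitness_default_mesh_shape_py : (List (String × List (List (String × List Int)))) × Option (List Int) :=
  ([("bond_tensors", [[("R", [1, 0, 0])], [("R", [0, 0, 2])]])], none)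

def Spec_default_mesh_shape_py (model : List (String × List (List (String × List Int)))) (mesh_shape : Option (List Int)) (out : List Int) : Prop := out = default_mesh_shape_py_alt model mesh_shape
instance (model : List (String × List (List (String × List Int)))) (mesh_shape : Option (List Int)) (out : List Int) : Decidable (Spec_default_mesh_shape_py model mesh_shape out) := by unfold Spec_default_mesh_shape_py; infer_instance

-- ===== CLAIM (what is proved, stated in full; the proofs are below) =====
def Claim_equal_default_mesh_shape_py : Prop := ∀ (model : List (String × List (List (String × List Int)))) (mesh_shape : Option (List Int)), Dom_default_mesh_shape_py model mesh_shape → Pre_default_mesh_shape_py model mesh_shape → Spec_default_mesh_shape_py model mesh_shape (default_mesh_shape_py model mesh_shape)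

-- ===== LEMMAS AND PROOFS =====

def pvAny (model : List (String × List (List (String × List Int)))) (a : Int) : Bool :=
  ((PySem.Dict.mk model).getD "bond_tensors" []).any (fun b => pvNZa b a)

-- the mask built from three axis-activity bits
def pvMOf (b0 b1 b2 : Bool) : Nat :=
  (if b0 then 1 else 0) ||| ((if b1 then 1 else 0) <<< 1) ||| ((if b2 then 1 else 0) <<< 2)

lemma pv_range3 : PySem.List.pyRange 0 3 1 = [0, 1, 2] := by decide

lemma pvBondMask_eq (bond : List (String × List Int)) :
    pvBondMask bond = pvMOf (pvNZa bond 0) (pvNZa bond 1) (pvNZa bond 2) := rfl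

lemma pvMOf_lor (x0 x1 x2 y0 y1 y2 : Bool) :
    pvMOf x0 x1 x2 ||| pvMOf y0 y1 y2 = pvMOf (x0 || y0) (x1 || y1) (x2 || y2) := by
  cases x0 <;> cases x1 <;> cases x2 <;> cases y0 <;> cases y1 <;> cases y2 <;> decide

-- B's fold ORs the per-axis 'any' bits together
lemma pv_maskfold (bonds : List (List (String × List Int))) (m : Nat) :
    bonds.foldl (fun m bond => m ||| pvBondMask bond) m =
      m ||| pvMOf (bonds.any (fun b => pvNZa b 0)) (bonds.any (fun b => pvNZa b 1))
                  (bonds.any (fun b => pvNZa b 2)) := by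
  induction bonds generalizing m with
  | nil => simp [pvMOf]
  | cons b bs ih =>
    simp only [List.foldl, List.any_cons]
    rw [ih, Nat.lor_assoc, pvBondMask_eq, pvMOf_lor]

lemma pvMask_eq (model : List (String × List (List (String × List Int)))) :
    ((PySem.Dict.mk model).getD "bond_tensors" []).foldl (fun m bond => m ||| pvBondMask bond) 0 =
      pvMOf (pvAny model 0) (pvAny model 1) (pvAny model 2) := by
  rw [pv_maskfold]; simp [pvAny]

-- A's active-axes list, by cases on the three per-axis scans
lemma pv_activeAxes_char (model : List (String × List (List (String × List Int)))) :
    pvActiveAxes model =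
      if pvAny model 0 = false ∧ pvAny model 1 = false ∧ pvAny model 2 = false then [0]
      else (if pvAny model 0 then [(0 : Int)] else []) ++
           (if pvAny model 1 then [1] else []) ++ (if pvAny model 2 then [2] else []) := by
  unfold pvActiveAxes
  rw [pv_range3]
  simp only [List.foldl]
  simp only [show ∀ a, ((PySem.Dict.mk model).getD "bond_tensors" []).any (fun b => pvNZa b a) = pvAny model a from fun _ => rfl]
  by_cases h0 : pvAny model 0 = true <;> by_cases h1 : pvAny model 1 = true <;>
    by_cases h2 : pvAny model 2 = true <;> simp [h0, h1, h2]

lemma pv_main (model : List (String × List (List (String × List Int)))) :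
    default_mesh_shape_py model none = default_mesh_shape_py_alt model none := by
  show (PySem.List.pyRange 0 3 1).foldl
      (fun acc axis => acc ++ [if PySem.Set.contains (PySem.Set.ofList (pvActiveAxes model)) axis then (17 : Int) else 1]) [] =
    (PySem.Dict.mk pvShapes).getD
      (if ((PySem.Dict.mk model).getD "bond_tensors" []).foldl (fun m bond => m ||| pvBondMask bond) 0 = 0 then 1
       else ((PySem.Dict.mk model).getD "bond_tensors" []).foldl (fun m bond => m ||| pvBondMask bond) 0) []
  rw [pvMask_eq, pv_range3, pv_activeAxes_char]
  by_cases h0 : pvAny model 0 = true <;> by_cases h1 : pvAny model 1 = true <;>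
    by_cases h2 : pvAny model 2 = true <;>
    simp only [h0, h1, h2, Bool.not_eq_true] at * <;> simp <;> decide

-- ===== VERDICT (by name: the statement is the Claim_ definition above) =====
theorem default_mesh_shape_py_spec : Claim_equal_default_mesh_shape_py := by
  intro model mesh_shape _hdom _hpre
  unfold Spec_default_mesh_shape_py
  cases mesh_shape with
  | some ms => rfl
  | none => exact pv_main model
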